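-- pv_equiv track=rewrite | github.com/Johnmn007/grupo2 | consolidado_texto.py | deberia_excluir_archivo
-- ===== SOURCE A (Python) =====
-- def deberia_excluir_archivo(nombre_archivo):
--     """Define qué archivos excluir"""
--     archivos_excluir = [
--         'package-lock.json', 'yarn.lock',  # Lock files
--         '.DS_Store', 'thumbs.db',  # Archivos del sistema
--         '*.min.js', '*.min.css',
--         'rojo.py','amarillo.py','verde.py'  # Archivos minificados
--     ]
--
--     nombre_archivo_lower = nombre_archivo.lower()
--
--     # Excluir por nombre exacto
--     if nombre_archivo_lower in archivos_excluir:
--         return True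
--
--     # Excluir por patrón
--     for patron in archivos_excluir:
--         if '*' in patron and nombre_archivo_lower.endswith(patron.replace('*', '')):
--             return True
--
--     return False
-- ===== SOURCE B (Python) =====
-- # B: precomputed split of the exclusion list into a frozenset of exact names and a
-- # suffix tuple, replacing A's list-membership pass plus pattern loop with two O(1)-ish tests.
-- # The list entries are kept verbatim ('.DS_Store' stays uppercase, so it can never match
-- # the lowercased name, exactly as in A); the '*' patterns become the suffix tuple, which
-- # also covers the literal names '*.min.js' / '*.min.css' (they end with their own suffix).
-- _EXACTOS = frozenset([
--     'package-lock.json', 'yarn.lock',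
--     '.DS_Store', 'thumbs.db',
--     'rojo.py', 'amarillo.py', 'verde.py',
-- ])
-- _SUFIJOS = ('.min.js', '.min.css')
--
-- def deberia_excluir_archivo(nombre_archivo):
--     """Define qué archivos excluir"""
--     nombre = nombre_archivo.lower()
--     return nombre in _EXACTOS or nombre.endswith(_SUFIJOS)
-- ===== Notes on version B (the rewrite author's own statement) =====
-- stated objective: simpler
-- what changed: A scans the mixed list for exact membership and then runs a second loop filtering the star patterns with replace and endswith; B precomputes a frozenset of the exact names and a suffix tuple, so the body is one membership test plus one tuple-endswith test with no loop over the original list.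
import Mathlib
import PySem

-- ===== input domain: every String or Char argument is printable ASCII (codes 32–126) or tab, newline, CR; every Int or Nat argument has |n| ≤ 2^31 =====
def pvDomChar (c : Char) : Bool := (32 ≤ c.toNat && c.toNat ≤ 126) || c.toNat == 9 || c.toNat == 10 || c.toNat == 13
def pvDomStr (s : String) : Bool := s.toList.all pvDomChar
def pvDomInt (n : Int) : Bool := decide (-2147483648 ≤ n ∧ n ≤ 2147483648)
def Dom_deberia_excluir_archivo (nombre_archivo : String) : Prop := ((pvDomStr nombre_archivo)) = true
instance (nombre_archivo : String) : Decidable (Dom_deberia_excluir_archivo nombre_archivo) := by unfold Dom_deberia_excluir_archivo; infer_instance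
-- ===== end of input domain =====

-- B replaces A's membership scan + '*'-pattern loop by a precomputed exact-name set and
-- a suffix pair tested directly (same return value; objective: simpler).
-- ===== PORT A =====
def deberia_excluir_archivo (nombre_archivo : String) : Bool :=
  let archivos_excluir : List String :=
    ["package-lock.json", "yarn.lock",
     ".DS_Store", "thumbs.db",
     "*.min.js", "*.min.css",
     "rojo.py", "amarillo.py", "verde.py"]
  let nombre_archivo_lower := PySem.Str.lower nombre_archivo
  -- 'if nombre_archivo_lower in archivos_excluir: return True'
  if archivos_excluir.contains nombre_archivo_lower then true
  else
    -- 'for patron in archivos_excluir: if '*' in patron and ….endswith(patron.replace('*','')): return True'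
    archivos_excluir.any (fun patron =>
      PySem.Str.isIn "*" patron &&
        PySem.Str.endswith nombre_archivo_lower (PySem.Str.replace patron "*" ""))

-- ===== PORT B =====
def pvExactos : PySem.Set String :=
  PySem.Set.ofList
    ["package-lock.json", "yarn.lock",
     ".DS_Store", "thumbs.db",
     "rojo.py", "amarillo.py", "verde.py"]

def deberia_excluir_archivo_alt (nombre_archivo : String) : Bool :=
  let nombre := PySem.Str.lower nombre_archivo
  -- 'nombre in _EXACTOS or nombre.endswith(_SUFIJOS)'; str.endswith with the pair
  -- ('.min.js', '.min.css') is the disjunction of the two suffix tests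
  PySem.Set.contains pvExactos nombre ||
    (PySem.Str.endswith nombre ".min.js" || PySem.Str.endswith nombre ".min.css")

-- ===== PRECONDITION & SPEC =====
def Spec_deberia_excluir_archivo (nombre_archivo : String) (out : Bool) : Prop := out = deberia_excluir_archivo_alt nombre_archivo
instance (nombre_archivo : String) (out : Bool) : Decidable (Spec_deberia_excluir_archivo nombre_archivo out) := by unfold Spec_deberia_excluir_archivo; infer_instance

-- ===== CLAIM (what is proved, stated in full; the proofs are below) =====
def Claim_equal_deberia_excluir_archivo : Prop := ∀ (nombre_archivo : String), Dom_deberia_excluir_archivo nombre_archivo → Spec_deberia_excluir_archivo nombre_archivo (deberia_excluir_archivo nombre_archivo)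

-- ===== LEMMAS AND PROOFS =====

-- ===== VERDICT (by name: the statement is the Claim_ definition above) =====
theorem deberia_excluir_archivo_spec : Claim_equal_deberia_excluir_archivo := by
  intro s _
  unfold Spec_deberia_excluir_archivo deberia_excluir_archivo deberia_excluir_archivo_alt
  simp only []
  set l := PySem.Str.lower s with hl
  by_cases h1 : l = "*.min.js"
  · rw [h1]; decide
  by_cases h2 : l = "*.min.css"
  · rw [h2]; decide
  · have he : pvExactos = ["package-lock.json", "yarn.lock", ".DS_Store", "thumbs.db",
        "rojo.py", "amarillo.py", "verde.py"] := by decide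
    have i1 : PySem.Str.isIn "*" "package-lock.json" = false := by decide
    have i2 : PySem.Str.isIn "*" "yarn.lock" = false := by decide
    have i3 : PySem.Str.isIn "*" ".DS_Store" = false := by decide
    have i4 : PySem.Str.isIn "*" "thumbs.db" = false := by decide
    have i5 : PySem.Str.isIn "*" "*.min.js" = true := by decide
    have i6 : PySem.Str.isIn "*" "*.min.css" = true := by decide
    have i7 : PySem.Str.isIn "*" "rojo.py" = false := by decide
    have i8 : PySem.Str.isIn "*" "amarillo.py" = false := by decide
    have i9 : PySem.Str.isIn "*" "verde.py" = false := by decide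
    have r1 : PySem.Str.replace "*.min.js" "*" "" = ".min.js" := by decide
    have r2 : PySem.Str.replace "*.min.css" "*" "" = ".min.css" := by decide
    rw [he]
    simp only [List.any_cons, List.any_nil, i1, i2, i3, i4, i5, i6, i7, i8, i9, r1, r2,
      Bool.false_and, Bool.true_and, Bool.or_false, Bool.false_or,
      PySem.Set.contains, List.contains_cons, List.contains_nil]
    simp [h1, h2]
    tauto
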